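-- pv_equiv track=rewrite | github.com/pjstoc2/sacred_text_project | Scripts/D3js Chord Diagram JSON Creator.py | find_cooccurrences
-- ===== SOURCE A (Python) =====
-- import itertools
-- from collections import Counter
--
-- def find_cooccurrences(entities, sentences):
--     cooccurrences = Counter()
--
--     for sentence in sentences:
--         words = sentence.split()  # Tokenize the sentence into words
--         present_entities = [entity for entity in entities if entity.lower() in [word.lower() for word in words]]
--
--         # Find all pairs of co-occurring entities in the sentence
--         for pair in itertools.combinations(present_entities, 2):
--             cooccurrences[pair] += 1
--
--     return cooccurrences
-- ===== SOURCE B (Python) =====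
-- from collections import Counter
--
-- def find_cooccurrences(entities, sentences):
--     cooccurrences = Counter()
--
--     # Inverted index: lowercased entity text -> positions in `entities` holding it.
--     index = {}
--     for pos, entity in enumerate(entities):
--         index.setdefault(entity.lower(), []).append(pos)
--
--     n = len(entities)
--     for sentence in sentences:
--         # Traverse the words, not the entities: collect positions hit by any word.
--         hit = set()
--         for word in sentence.split():
--             hit.update(index.get(word.lower(), []))
--         present = [entities[p] for p in range(n) if p in hit]
--
--         # Count each ordered pair x-before-y among the present entities.
--         rest = present
--         while len(rest) > 1:
--             x = rest[0]
--             rest = rest[1:]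
--             for y in rest:
--                 cooccurrences[(x, y)] += 1
--
--     return cooccurrences
-- ===== Notes on version B (the rewrite author's own statement) =====
-- stated objective: alternative
-- what changed: B builds an inverted index (lowercased entity -> positions) once and traverses each sentence's words to collect the set of present entity positions, instead of A's per-sentence scan of every entity against a freshly re-lowered word list; the pair counting walks suffixes instead of calling itertools.combinations.
import Mathlib
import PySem

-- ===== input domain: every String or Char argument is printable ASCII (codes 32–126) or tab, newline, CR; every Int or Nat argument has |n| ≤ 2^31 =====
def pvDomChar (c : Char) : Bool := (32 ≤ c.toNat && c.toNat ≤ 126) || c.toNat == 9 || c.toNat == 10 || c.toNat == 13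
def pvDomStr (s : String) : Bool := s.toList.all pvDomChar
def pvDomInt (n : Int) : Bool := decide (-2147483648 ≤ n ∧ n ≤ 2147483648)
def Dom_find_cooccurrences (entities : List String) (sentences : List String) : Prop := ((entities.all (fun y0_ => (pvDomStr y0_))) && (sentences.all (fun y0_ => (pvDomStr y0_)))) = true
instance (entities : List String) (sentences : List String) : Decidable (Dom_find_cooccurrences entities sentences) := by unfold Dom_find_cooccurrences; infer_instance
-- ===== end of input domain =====

-- B replaces A's per-entity scan of the (re-lowered) word list by an inverted index over entity
-- positions traversed word by word, and counts pairs by walking suffixes; objective: alternative.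

-- ===== PORT A =====
-- itertools.combinations(l, 2) in CPython's order, specialised to pairs (the tuple result type
-- String × String forces the pair form of PySem.List.combinations · 2).
def pvCombos2 {α : Type} (l : List α) : List (α × α) :=
  match l with
  | [] => []
  | x :: xs => xs.map (fun y => (x, y)) ++ pvCombos2 xs

def find_cooccurrences (entities : List String) (sentences : List String) : List (String × String × Int) :=
  (sentences.foldl (fun cooc sentence =>
      let words := PySem.Str.split₀ sentence
      let present := entities.filter (fun e =>
        (words.map PySem.Str.lower).contains (PySem.Str.lower e))
      (pvCombos2 present).foldl (fun c p => c.modify p 0 (· + 1)) cooc)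
    (PySem.Dict.empty : PySem.Dict (String × String) Int)).items.map
    (fun p => (p.1.1, p.1.2, p.2))

-- ===== PORT B =====
-- 'while len(rest) > 1: x = rest[0]; rest = rest[1:]; for y in rest: cooccurrences[(x,y)] += 1'
def pvPairLoop (rest : List String) (c : PySem.Dict (String × String) Int) :
    PySem.Dict (String × String) Int :=
  match rest with
  | x :: y :: ys =>
      pvPairLoop (y :: ys) ((y :: ys).foldl (fun c z => c.modify (x, z) 0 (· + 1)) c)
  | _ => c

def find_cooccurrences_alt (entities : List String) (sentences : List String) : List (String × String × Int) :=
  -- index.setdefault(entity.lower(), []).append(pos)  ≡  index[k] = index.get(k, []) + [pos]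
  let index : PySem.Dict String (List Int) :=
    (PySem.List.enumerate entities).foldl
      (fun d pe => d.modify (PySem.Str.lower pe.2) [] (· ++ [pe.1])) PySem.Dict.empty
  let n := entities.length
  (sentences.foldl (fun cooc sentence =>
      let hit : PySem.Set Int :=
        (PySem.Str.split₀ sentence).foldl
          (fun h w => PySem.Set.update h (index.getD (PySem.Str.lower w) [])) PySem.Set.empty
      let present := ((PySem.List.pyRange 0 (n : Int) 1).filter (fun p => PySem.Set.contains hit p)).map
        (fun p => PySem.List.pyGetD entities p "")
      pvPairLoop present cooc)
    (PySem.Dict.empty : PySem.Dict (String × String) Int)).items.map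
    (fun p => (p.1.1, p.1.2, p.2))

-- ===== PRECONDITION & SPEC =====
def Spec_find_cooccurrences (entities : List String) (sentences : List String) (out : List (String × String × Int)) : Prop := out = find_cooccurrences_alt entities sentences
instance (entities : List String) (sentences : List String) (out : List (String × String × Int)) : Decidable (Spec_find_cooccurrences entities sentences out) := by unfold Spec_find_cooccurrences; infer_instance

-- ===== CLAIM (what is proved, stated in full; the proofs are below) =====
def Claim_equal_find_cooccurrences : Prop := ∀ (entities : List String) (sentences : List String), Dom_find_cooccurrences entities sentences → Spec_find_cooccurrences entities sentences (find_cooccurrences entities sentences)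

-- ===== LEMMAS AND PROOFS =====

-- the pair loop of B is the combinations fold of A
theorem pvPairLoop_eq (l : List String) (c : PySem.Dict (String × String) Int) :
    pvPairLoop l c = (pvCombos2 l).foldl (fun c p => c.modify p 0 (· + 1)) c := by
  induction l generalizing c with
  | nil => simp [pvPairLoop, pvCombos2]
  | cons x xs ih =>
    cases xs with
    | nil => simp [pvPairLoop, pvCombos2]
    | cons y ys =>
      simp only [pvPairLoop, pvCombos2, List.foldl_append, ih, List.foldl_map]

-- membership in B's per-sentence hit set
theorem mem_hit (ws : List String) (g : String → List Int) (h0 : PySem.Set Int) (p : Int) :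
    (p ∈ ws.foldl (fun h w => PySem.Set.update h (g w)) h0) ↔
      p ∈ h0 ∨ ∃ w ∈ ws, p ∈ g w := by
  induction ws generalizing h0 with
  | nil => simp
  | cons w ws ih => simp [ih, PySem.Set.mem_update, or_assoc]

-- B's inverted index looked up at key k
theorem index_getD (entities : List String) (k : String) :
    ((PySem.List.enumerate entities).foldl
        (fun d pe => d.modify (PySem.Str.lower pe.2) [] (· ++ [pe.1]))
        (PySem.Dict.empty : PySem.Dict String (List Int))).getD k []
      = (((PySem.List.enumerate entities).filter
            (fun pe => PySem.Str.lower pe.2 == k)).map (·.1)) := by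
  have h := PySem.Dict.getD_foldl_modify_append
    (l := (PySem.List.enumerate entities).map (fun pe => (PySem.Str.lower pe.2, pe.1)))
    (d := (PySem.Dict.empty : PySem.Dict String (List Int))) (c := k)
  rw [List.foldl_map] at h
  rw [h]
  simp [List.filter_map, List.map_map, Function.comp_def]

-- the generic comprehension [l[i] for i in range(len(l)) if q(l[i])] is l.filter q
theorem filter_range_getD {α : Type} (l : List α) (q : α → Bool) (d : α) :
    ((List.range l.length).filter (fun i => q (l.getD i d))).map (fun i => l.getD i d)
      = l.filter q := by
  induction l with
  | nil => simp
  | cons x xs ih =>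
    rw [List.length_cons, List.range_succ_eq_map]
    simp only [List.getD] at ih
    simp only [List.filter_cons, List.filter_map,
      Function.comp_def, List.getD, List.getElem?_cons_succ]
    by_cases hx : q x = true
    · simpa [hx, Function.comp_def, Nat.succ_eq_add_one, List.getElem?_cons_succ] using ih
    · simpa [hx, Function.comp_def, Nat.succ_eq_add_one, List.getElem?_cons_succ] using ih

theorem present_eq (entities : List String) (sentence : String) :
    (((PySem.List.pyRange 0 (entities.length : Int) 1).filter (fun p =>
        PySem.Set.contains
          ((PySem.Str.split₀ sentence).foldl
            (fun h w => PySem.Set.update h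
              (((PySem.List.enumerate entities).foldl
                  (fun d pe => d.modify (PySem.Str.lower pe.2) [] (· ++ [pe.1]))
                  PySem.Dict.empty).getD (PySem.Str.lower w) []))
            PySem.Set.empty) p)).map
        (fun p => PySem.List.pyGetD entities p ""))
      = entities.filter (fun e =>
          ((PySem.Str.split₀ sentence).map PySem.Str.lower).contains (PySem.Str.lower e)) := by
  have hrange : PySem.List.pyRange 0 (entities.length : Int) 1
      = (List.range entities.length).map (fun k : Nat => (k : Int)) := by
    rw [PySem.List.pyRange_one]
    simp
  rw [hrange, List.filter_map, List.map_map]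
  have hcongr : ∀ i ∈ (List.range entities.length),
      ((fun p => PySem.Set.contains
          ((PySem.Str.split₀ sentence).foldl
            (fun h w => PySem.Set.update h
              (((PySem.List.enumerate entities).foldl
                  (fun d pe => d.modify (PySem.Str.lower pe.2) [] (· ++ [pe.1]))
                  PySem.Dict.empty).getD (PySem.Str.lower w) []))
            PySem.Set.empty) p) ∘ (fun k : Nat => (k : Int))) i
        = ((PySem.Str.split₀ sentence).map PySem.Str.lower).contains
            (PySem.Str.lower (entities.getD i "")) := by
    intro i hi
    rw [List.mem_range] at hi
    simp only [Function.comp_def, PySem.Set.contains_eq_listContains, List.contains_eq_mem,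
      decide_eq_decide]
    rw [mem_hit]
    simp only [PySem.Set.empty, List.not_mem_nil, false_or]
    constructor
    · rintro ⟨w, hw, hpw⟩
      rw [index_getD] at hpw
      simp only [List.mem_map, List.mem_filter, PySem.List.mem_enumerate_iff] at hpw
      obtain ⟨⟨j, x⟩, ⟨⟨k, hk, hpe⟩, hlow⟩, hj⟩ := hpw
      cases hpe
      simp only at hj hlow
      have : k = i := by omega
      subst this
      refine List.mem_map.2 ⟨w, hw, ?_⟩
      rw [beq_iff_eq] at hlow
      rw [List.getD_eq_getElem _ _ hi, hlow]
    · intro hmem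
      obtain ⟨w, hw, hlw⟩ := List.mem_map.1 hmem
      refine ⟨w, hw, ?_⟩
      rw [index_getD]
      refine List.mem_map.2 ⟨((i : Int), entities[i]), ?_, rfl⟩
      refine List.mem_filter.2 ⟨(PySem.List.mem_enumerate_iff _ _ _).2 ⟨i, hi, by simp⟩, ?_⟩
      rw [List.getD_eq_getElem _ _ hi] at hlw
      simp [hlw]
  rw [List.filter_congr hcongr]
  have hget : ∀ i ∈ ((List.range entities.length).filter (fun i =>
      ((PySem.Str.split₀ sentence).map PySem.Str.lower).contains
        (PySem.Str.lower (entities.getD i "")))),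
      ((fun p => PySem.List.pyGetD entities p "") ∘ (fun k : Nat => (k : Int))) i
        = entities.getD i "" := by
    intro i hi
    simp [PySem.List.pyGetD_natCast]
  rw [List.map_congr_left hget]
  exact filter_range_getD entities
    (fun e => ((PySem.Str.split₀ sentence).map PySem.Str.lower).contains (PySem.Str.lower e)) ""

-- ===== VERDICT (by name: the statement is the Claim_ definition above) =====
theorem find_cooccurrences_spec : Claim_equal_find_cooccurrences := by
  intro entities sentences _
  unfold Spec_find_cooccurrences find_cooccurrences find_cooccurrences_alt
  simp only []
  congr 1
  congr 1
  apply PySem.List.foldl_congr_mem'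
  intro sentence hs cooc
  rw [present_eq, pvPairLoop_eq]
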